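-- pv_equiv track=rewrite | github.com/leo1229/CS61A | project/hog/hog.py | free_bacon
-- ===== SOURCE A (Python) =====
-- def free_bacon(score):
--     """Return the points scored from rolling 0 dice (Free Bacon).
--
--     score:  The opponent's current score.
--     """
--     assert score < 100, 'The game should be over.'
--     # BEGIN PROBLEM 2
--     "*** YOUR CODE HERE ***"
--     r1=score*score*score
--     i=1
--     s=0
--     j=0
--     while r1//pow(10,i)!=0:
--         i=i+1
--     while i>0:
--         s,j,i,r1=s+pow(-1,j)*(r1//pow(10,i-1)),j+1,i-1,r1%pow(10,i-1)
--     return abs(s)+1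
-- ===== SOURCE B (Python) =====
-- def free_bacon(score):
--     """Return the points scored from rolling 0 dice (Free Bacon).
--
--     score:  The opponent's current score.
--     """
--     assert score < 100, 'The game should be over.'
--     n = score ** 3
--     s = 0
--     sign = 1
--     while n:
--         s += sign * (n % 10)
--         n //= 10
--         sign = -sign
--     return abs(s) + 1
-- ===== Notes on version B (the rewrite author's own statement) =====
-- stated objective: simpler
-- what changed: One least-significant-first pass with an alternating sign accumulator replaces A's separate digit-count loop plus MSB-to-LSB extraction loop; abs absorbs the sign flip from the reversed digit order.
import Mathlib
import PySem

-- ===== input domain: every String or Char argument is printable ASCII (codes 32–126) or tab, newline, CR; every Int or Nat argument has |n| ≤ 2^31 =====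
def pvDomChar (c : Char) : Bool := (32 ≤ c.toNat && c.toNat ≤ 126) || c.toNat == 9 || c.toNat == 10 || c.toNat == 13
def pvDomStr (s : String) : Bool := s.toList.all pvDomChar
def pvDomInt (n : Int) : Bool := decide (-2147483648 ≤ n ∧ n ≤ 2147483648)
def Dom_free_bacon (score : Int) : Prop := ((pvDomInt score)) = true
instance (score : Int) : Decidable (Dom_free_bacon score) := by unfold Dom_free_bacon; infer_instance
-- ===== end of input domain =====

-- ===== PORT A =====
-- B changes: one LSB-first alternating-sum pass replaces A's two loops (digit count, then MSB-to-LSB extraction).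
-- While loop `while r1//10^i != 0: i += 1`; fuel 32 bounds the iterations, exact on Pre_ (0 ≤ score < 100 ⇒ r1 < 10^6).
def fbCountLoop : Nat → Int → Nat → Nat
  | 0, _, i => i
  | fuel+1, r1, i =>
    if PySem.Int.floordiv r1 (10 ^ i) ≠ 0 then fbCountLoop fuel r1 (i+1) else i

-- While loop `while i > 0: s,j,i,r1 = s+(-1)^j*(r1//10^(i-1)), j+1, i-1, r1%10^(i-1)`.
def fbSumLoop : Nat → Int → Nat → Int → Int
  | 0, s, _, _ => s
  | i+1, s, j, r1 =>
    fbSumLoop i (s + (-1)^j * PySem.Int.floordiv r1 (10 ^ i)) (j+1) (PySem.Int.mod r1 (10 ^ i))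

def free_bacon (score : Int) : Int :=
  let r1 := score * score * score
  let i := fbCountLoop 32 r1 1
  |fbSumLoop i 0 0 r1| + 1

-- ===== PORT B =====
-- While loop `while n: s += sign*(n%10); n //= 10; sign = -sign`; fuel 32, exact on Pre_.
def fbAltLoop : Nat → Int → Int → Int → Int
  | 0, _, s, _ => s
  | fuel+1, n, s, sign =>
    if n ≠ 0 then
      fbAltLoop fuel (PySem.Int.floordiv n 10) (s + sign * PySem.Int.mod n 10) (-sign)
    else s

def free_bacon_alt (score : Int) : Int :=
  let n := score ^ 3
  |fbAltLoop 32 n 0 1| + 1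

-- ===== PRECONDITION & SPEC =====
-- Pre_ excludes score ≥ 100 (A's assert raises AssertionError) and score < 0 (A's first while loop never
-- terminates on a negative cube, so A returns nothing there; B's loop does not terminate there either).
def Pre_free_bacon (score : Int) : Prop := 0 ≤ score ∧ score < 100
instance (score : Int) : Decidable (Pre_free_bacon score) := by unfold Pre_free_bacon; infer_instance
def pvWitness_free_bacon : Int := (7)

def Spec_free_bacon (score : Int) (out : Int) : Prop := out = free_bacon_alt score
instance (score : Int) (out : Int) : Decidable (Spec_free_bacon score out) := by unfold Spec_free_bacon; infer_instance

-- ===== CLAIM (what is proved, stated in full; the proofs are below) =====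
def Claim_equal_free_bacon : Prop := ∀ (score : Int), Dom_free_bacon score → Pre_free_bacon score → Spec_free_bacon score (free_bacon score)

-- ===== LEMMAS AND PROOFS =====

-- ===== VERDICT (by name: the statement is the Claim_ definition above) =====
theorem free_bacon_spec : Claim_equal_free_bacon := by
  unfold Claim_equal_free_bacon
  intro score _ hpre
  obtain ⟨h0, h1⟩ := hpre
  interval_cases score <;> decide
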